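-- pv_equiv track=rewrite | github.com/jmkim0/algorithm_study | baekjoon/class_5/p12100_old.py | align_matrix
-- ===== SOURCE A (Python) =====
-- def dir_index_helper(dir, i, j):
--     if dir == 0:
--         return (j, i)
--     if dir == 1:
--         return (i, -1-j)
--     if dir == 2:
--         return (-1-j, i)
--     if dir == 3:
--         return (i, j)
--
-- def align_matrix(matrix, dir):
--     n = len(matrix)
--     changed = False
--
--     for i in range(n):
--         temp = []
--
--         for j in range(n):
--             y, x = dir_index_helper(dir, i, j)
--             if matrix[y][x] != 0:
--                 temp.append(matrix[y][x])
--
--         k = len(temp)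
--
--         if k == n:
--             continue
--
--         for j in range(k):
--             y, x = dir_index_helper(dir, i, j)
--             if matrix[y][x] != temp[j]:
--                 changed = True
--                 matrix[y][x] = temp[j]
--
--         for j in range(k, n):
--             y, x = dir_index_helper(dir, i, j)
--             matrix[y][x] = 0
--
--     return changed
-- ===== SOURCE B (Python) =====
-- def align_matrix(matrix, dir):
--     n = len(matrix)
--     # Orient the board so the requested slide becomes "compact each line toward index 0".
--     if dir == 3:
--         lines = [list(row) for row in matrix]
--     elif dir == 1:
--         lines = [list(reversed(row)) for row in matrix]
--     elif dir == 0: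
--         lines = [[row[i] for row in matrix] for i in range(n)]
--     elif dir == 2:
--         lines = [[row[i] for row in matrix][::-1] for i in range(n)]
--     else:
--         raise ValueError("dir must be 0, 1, 2 or 3")
--     new_lines = []
--     for line in lines:
--         nz = [v for v in line if v != 0]
--         new_lines.append(nz + [0] * (n - len(nz)))
--     changed = new_lines != lines
--     # Write the compacted lines back into the original matrix object (in-place, like A).
--     for i in range(n):
--         for j in range(n):
--             v = new_lines[i][j]
--             if dir == 3:
--                 matrix[i][j] = v
--             elif dir == 1:
--                 matrix[i][n - 1 - j] = v
--             elif dir == 0: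
--                 matrix[j][i] = v
--             else:
--                 matrix[n - 1 - j][i] = v
--     return changed
-- ===== Notes on version B (the rewrite author's own statement) =====
-- stated objective: alternative
-- what changed: Replaces the per-cell dir_index_helper coordinate mapping and three conditional write loops with an orientation-normalizing pipeline: extract the lines for the given direction (rows / reversed rows / columns / reversed columns), compact each line as nonzeros + zero padding, set changed = (new lines != old lines), and write the compacted lines back.
-- outside the precondition, e.g. on align_matrix([[0, 1, 5], [2, 3, 4]], 1): A returns False, B returns True
import Mathlib
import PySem

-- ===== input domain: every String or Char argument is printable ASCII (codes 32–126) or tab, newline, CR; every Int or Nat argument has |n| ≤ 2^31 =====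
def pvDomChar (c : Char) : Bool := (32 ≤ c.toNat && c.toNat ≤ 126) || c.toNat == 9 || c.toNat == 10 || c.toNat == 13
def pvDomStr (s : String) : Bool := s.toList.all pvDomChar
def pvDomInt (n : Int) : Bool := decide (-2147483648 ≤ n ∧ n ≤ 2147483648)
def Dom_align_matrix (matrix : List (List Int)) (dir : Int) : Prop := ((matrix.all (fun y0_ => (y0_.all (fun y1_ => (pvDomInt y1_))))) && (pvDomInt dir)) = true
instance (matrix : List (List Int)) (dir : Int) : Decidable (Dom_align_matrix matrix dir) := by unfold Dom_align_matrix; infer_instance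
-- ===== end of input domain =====

-- ===== PORT A =====
-- B re-implements the slide as an orientation-normalizing pipeline (lines -> compacted lines);
-- A mutates `matrix` in place and B performs the same in-place mutation (same final contents);
-- the equivalence proved here is about the returned Bool.
def dir_index_helper (dir i j : Int) : Int × Int :=
  if dir = 0 then (j, i)
  else if dir = 1 then (i, -1 - j)
  else if dir = 2 then (-1 - j, i)
  else (i, j)  -- reached with dir = 3 under Pre_; other dirs make Python raise (unpacking None)

-- matrix[y][x] read/write; exact for in-range (incl. negative) indices, which Pre_ guarantees
def pvGet2 (m : List (List Int)) (y x : Int) : Int :=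
  PySem.List.pyGetD (PySem.List.pyGetD m y []) x 0

def pvSet2 (m : List (List Int)) (y x : Int) (v : Int) : List (List Int) :=
  PySem.List.pySetD m y (PySem.List.pySetD (PySem.List.pyGetD m y []) x v)

-- the body of A's outer `for i in range(n)` loop (temp collection, the two write loops)
def pvStepA (n : Nat) (dir : Int) (st : List (List Int) × Bool) (i : Int) :
    List (List Int) × Bool :=
  let temp := (PySem.List.pyRange 0 (n : Int) 1).foldl (fun t j =>
      let yx := dir_index_helper dir i j
      if pvGet2 st.1 yx.1 yx.2 ≠ 0 then t ++ [pvGet2 st.1 yx.1 yx.2] else t) []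
  let k := temp.length
  if k = n then st
  else
    let st2 := (PySem.List.pyRange 0 (k : Int) 1).foldl (fun st' j =>
        let yx := dir_index_helper dir i j
        if pvGet2 st'.1 yx.1 yx.2 ≠ PySem.List.pyGetD temp j 0 then
          (pvSet2 st'.1 yx.1 yx.2 (PySem.List.pyGetD temp j 0), true)
        else st') st
    let m2 := (PySem.List.pyRange (k : Int) (n : Int) 1).foldl (fun m' j =>
        let yx := dir_index_helper dir i j
        pvSet2 m' yx.1 yx.2 0) st2.1
    (m2, st2.2)

def align_matrix (matrix : List (List Int)) (dir : Int) : Bool :=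
  ((PySem.List.pyRange 0 (matrix.length : Int) 1).foldl (pvStepA matrix.length dir)
    (matrix, false)).2

-- ===== PORT B =====
def pvCompact (n : Nat) (line : List Int) : List Int :=
  let nz := line.filter (fun v => decide (v ≠ 0))
  nz ++ List.replicate (n - nz.length) 0

-- lines of the board oriented so the slide direction becomes "toward index 0"
def pvLines (matrix : List (List Int)) (dir : Int) : List (List Int) :=
  let n := matrix.length
  if dir = 3 then matrix
  else if dir = 1 then matrix.map List.reverse
  else if dir = 0 then
    (List.range n).map (fun i : Nat => matrix.map (fun r => PySem.List.pyGetD r (i : Int) 0))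
  else
    (List.range n).map (fun i : Nat => (matrix.map (fun r => PySem.List.pyGetD r (i : Int) 0)).reverse)

def align_matrix_alt (matrix : List (List Int)) (dir : Int) : Bool :=
  let lines := pvLines matrix dir
  let newLines := lines.map (pvCompact matrix.length)
  decide (newLines ≠ lines)

-- ===== PRECONDITION & SPEC =====
-- Pre_ excludes non-square matrices (on an n-row matrix with longer rows A still returns, but its
-- negative indexing then reads a row-dependent mix of cells that is an accident of its square-board
-- assumption) and dir outside {0,1,2,3}, where A raises TypeError unpacking None.
def Pre_align_matrix (matrix : List (List Int)) (dir : Int) : Prop :=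
  (∀ r ∈ matrix, r.length = matrix.length) ∧ (dir = 0 ∨ dir = 1 ∨ dir = 2 ∨ dir = 3)
instance (matrix : List (List Int)) (dir : Int) : Decidable (Pre_align_matrix matrix dir) := by
  unfold Pre_align_matrix; infer_instance

def pvWitness_align_matrix : List (List Int) × Int := ([[2, 0], [0, 4]], 0)

def Spec_align_matrix (matrix : List (List Int)) (dir : Int) (out : Bool) : Prop := out = align_matrix_alt matrix dir
instance (matrix : List (List Int)) (dir : Int) (out : Bool) : Decidable (Spec_align_matrix matrix dir out) := by unfold Spec_align_matrix; infer_instance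

-- ===== CLAIM (what is proved, stated in full; the proofs are below) =====
def Claim_equal_align_matrix : Prop := ∀ (matrix : List (List Int)) (dir : Int), Dom_align_matrix matrix dir → Pre_align_matrix matrix dir → Spec_align_matrix matrix dir (align_matrix matrix dir)

-- ===== LEMMAS AND PROOFS =====

def pvNg (m : List (List Int)) (rc : Nat × Nat) : Int := (m.getD rc.1 []).getD rc.2 0
def pvNs (m : List (List Int)) (rc : Nat × Nat) (v : Int) : List (List Int) :=
  m.set rc.1 ((m.getD rc.1 []).set rc.2 v)
def pvCoord (dir : Int) (n i j : Nat) : Nat × Nat :=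
  if dir = 0 then (j, i)
  else if dir = 1 then (i, n - 1 - j)
  else if dir = 2 then (n - 1 - j, i)
  else (i, j)
def pvLineAt (m : List (List Int)) (dir : Int) (n i : Nat) : List Int :=
  (List.range n).map (fun j => pvNg m (pvCoord dir n i j))
def pvSquare (m : List (List Int)) (n : Nat) : Prop :=
  m.length = n ∧ ∀ r ∈ m, r.length = n
def pvDirOK (d : Int) : Prop := d = 0 ∨ d = 1 ∨ d = 2 ∨ d = 3
lemma pv_foldl_pyRange {β : Type} (g : β → Int → β) (init : β) (a b : Int) :
    (PySem.List.pyRange a b 1).foldl g init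
      = (List.range (b - a).toNat).foldl (fun s (k : Nat) => g s (a + (k : Int))) init := by
  rw [PySem.List.pyRange_one, List.foldl_map]

lemma pv_getD_row {m : List (List Int)} {n : Nat} (hm : pvSquare m n) {r : Nat} (hr : r < n) :
    (m.getD r []).length = n := by
  have hr' : r < m.length := by have := hm.1; omega
  rw [List.getD_eq_getElem m [] hr']
  exact hm.2 _ (List.getElem_mem _)

lemma pv_pyGetD_negsub {α : Type} (xs : List α) (j : Nat) (h : j < xs.length) (d : α) :
    PySem.List.pyGetD xs (-1 - (j : Int)) d = xs.getD (xs.length - 1 - j) d := by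
  simp only [PySem.List.pyGetD, PySem.List.pyGet?, PySem.List.pyIdx?]
  rw [if_neg (by omega), if_pos (by omega)]
  simp only [Option.bind_some]
  have : ((-(-1 - (j:Int))).toNat) = j + 1 := by omega
  rw [this]
  rw [List.getD_eq_getElem?_getD]
  congr 2
  omega

lemma pv_pySetD_negsub {α : Type} (xs : List α) (j : Nat) (h : j < xs.length) (v : α) :
    PySem.List.pySetD xs (-1 - (j : Int)) v = xs.set (xs.length - 1 - j) v := by
  simp only [PySem.List.pySetD, PySem.List.pySet?, PySem.List.pyIdx?]
  rw [if_neg (by omega), if_pos (by omega)]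
  simp only [Option.map_some, Option.getD_some]
  congr 1
  omega

lemma pv_square_ns {m : List (List Int)} {n : Nat} (hm : pvSquare m n)
    {rc : Nat × Nat} (h1 : rc.1 < n) (v : Int) : pvSquare (pvNs m rc v) n := by
  obtain ⟨hl, hs⟩ := hm
  refine ⟨by simp [pvNs, hl], ?_⟩
  intro r hr
  rcases List.mem_or_eq_of_mem_set hr with h | h
  · exact hs r h
  · subst h
    rw [List.length_set]
    have : m.getD rc.1 [] = m[rc.1]'(by omega) := List.getD_eq_getElem m [] (by omega)
    rw [this]
    exact hs _ (List.getElem_mem _)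

lemma pv_coord_lt {d : Int} (hd : pvDirOK d) {n i j : Nat} (hi : i < n) (hj : j < n) :
    (pvCoord d n i j).1 < n ∧ (pvCoord d n i j).2 < n := by
  rcases hd with h | h | h | h <;> subst h <;> simp [pvCoord] <;> omega

lemma pv_coord_inj {d : Int} (hd : pvDirOK d) {n i j i' j' : Nat}
    (_hi : i < n) (hj : j < n) (_hi' : i' < n) (hj' : j' < n)
    (hne : ¬ (i = i' ∧ j = j')) : pvCoord d n i j ≠ pvCoord d n i' j' := by
  rcases hd with h | h | h | h <;> subst h <;> simp [pvCoord, Prod.ext_iff] <;> omega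

lemma pv_lineAt_length (m : List (List Int)) (d : Int) (n i : Nat) :
    (pvLineAt m d n i).length = n := by
  simp [pvLineAt]

lemma pv_lineAt_getD (m : List (List Int)) (d : Int) {n i j : Nat} (hj : j < n) :
    (pvLineAt m d n i).getD j 0 = pvNg m (pvCoord d n i j) := by
  rw [List.getD_eq_getElem?_getD]
  simp [pvLineAt, hj]

lemma pv_any_map_ne (L : List (List Int)) (f : List Int → List Int) :
    (L.any fun l => decide (f l ≠ l)) = decide (L.map f ≠ L) := by
  induction L with
  | nil => simp
  | cons x L ih =>
    simp only [List.any_cons, List.map_cons, ne_eq, decide_not] at *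
    by_cases h : f x = x <;> simp [h, ih]

lemma pv_get2_coord {m : List (List Int)} {n : Nat} (hm : pvSquare m n)
    {d : Int} (hd : pvDirOK d) {i j : Nat} (hi : i < n) (hj : j < n) :
    pvGet2 m (dir_index_helper d ↑i ↑j).1 (dir_index_helper d ↑i ↑j).2
      = pvNg m (pvCoord d n i j) := by
  have hlen := hm.1
  rcases hd with h | h | h | h <;> subst h
  · simp [pvGet2, dir_index_helper, pvNg, pvCoord, PySem.List.pyGetD_natCast]
  · have h1 : dir_index_helper 1 ↑i ↑j = (↑i, -1 - (j:Int)) := by norm_num [dir_index_helper]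
    have hc : pvCoord 1 n i j = (i, n - 1 - j) := by norm_num [pvCoord]
    rw [h1, hc]
    simp only [pvGet2, pvNg]
    rw [PySem.List.pyGetD_natCast]
    rw [pv_pyGetD_negsub _ j (by rw [pv_getD_row hm hi]; omega) 0, pv_getD_row hm hi]
  · have h1 : dir_index_helper 2 ↑i ↑j = (-1 - (j:Int), ↑i) := by norm_num [dir_index_helper]
    have hc : pvCoord 2 n i j = (n - 1 - j, i) := by norm_num [pvCoord]
    rw [h1, hc]
    simp only [pvGet2, pvNg]
    rw [pv_pyGetD_negsub m j (by omega) ([] : List Int), hlen,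
      PySem.List.pyGetD_natCast]
  · have h1 : dir_index_helper 3 ↑i ↑j = ((i:Int), (j:Int)) := by norm_num [dir_index_helper]
    have hc : pvCoord 3 n i j = (i, j) := by norm_num [pvCoord]
    rw [h1, hc]
    simp only [pvGet2, pvNg]
    rw [PySem.List.pyGetD_natCast, PySem.List.pyGetD_natCast]

lemma pv_set2_coord {m : List (List Int)} {n : Nat} (hm : pvSquare m n)
    {d : Int} (hd : pvDirOK d) {i j : Nat} (hi : i < n) (hj : j < n) (v : Int) :
    pvSet2 m (dir_index_helper d ↑i ↑j).1 (dir_index_helper d ↑i ↑j).2 v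
      = pvNs m (pvCoord d n i j) v := by
  have hlen := hm.1
  rcases hd with h | h | h | h <;> subst h
  · simp [pvSet2, dir_index_helper, pvNs, pvCoord, PySem.List.pyGetD_natCast,
      PySem.List.pySetD_natCast]
  · have h1 : dir_index_helper 1 ↑i ↑j = (↑i, -1 - (j:Int)) := by norm_num [dir_index_helper]
    have hc : pvCoord 1 n i j = (i, n - 1 - j) := by norm_num [pvCoord]
    rw [h1, hc]
    simp only [pvSet2, pvNs]
    rw [PySem.List.pyGetD_natCast, PySem.List.pySetD_natCast]
    rw [pv_pySetD_negsub _ j (by rw [pv_getD_row hm hi]; omega) v, pv_getD_row hm hi]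
  · have h1 : dir_index_helper 2 ↑i ↑j = (-1 - (j:Int), ↑i) := by norm_num [dir_index_helper]
    have hc : pvCoord 2 n i j = (n - 1 - j, i) := by norm_num [pvCoord]
    rw [h1, hc]
    simp only [pvSet2, pvNs]
    rw [pv_pyGetD_negsub m j (by omega) ([] : List Int),
      pv_pySetD_negsub m j (by omega) _, hlen, PySem.List.pySetD_natCast]
  · have h1 : dir_index_helper 3 ↑i ↑j = ((i:Int), (j:Int)) := by norm_num [dir_index_helper]
    have hc : pvCoord 3 n i j = (i, j) := by norm_num [pvCoord]
    rw [h1, hc]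
    simp only [pvSet2, pvNs]
    rw [PySem.List.pyGetD_natCast, PySem.List.pySetD_natCast, PySem.List.pySetD_natCast]

lemma pv_ng_ns {m : List (List Int)} {n : Nat} (hm : pvSquare m n)
    {rc : Nat × Nat} (h1 : rc.1 < n) (h2 : rc.2 < n) (rc' : Nat × Nat) (v : Int) :
    pvNg (pvNs m rc v) rc' = if rc' = rc then v else pvNg m rc' := by
  have hlen := hm.1
  have hrow : (m[rc.1]?.getD ([] : List Int)).length = n := by
    rw [← List.getD_eq_getElem?_getD]; exact pv_getD_row hm h1
  simp only [pvNg, pvNs, List.getD_eq_getElem?_getD]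
  by_cases hr : rc'.1 = rc.1
  · rw [hr, List.getElem?_set_self (by omega)]
    simp only [Option.getD_some]
    by_cases hc : rc'.2 = rc.2
    · rw [if_pos (Prod.ext hr hc), hc, List.getElem?_set_self (by omega)]
      rfl
    · rw [if_neg (fun he => hc (by rw [he]))]
      rw [List.getElem?_set_ne (fun he => hc he.symm)]
  · rw [if_neg (fun he => hr (by rw [he]))]
    rw [List.getElem?_set_ne (fun he => hr he.symm)]

lemma pv_temp_eq {m : List (List Int)} {n : Nat} (hm : pvSquare m n)
    {d : Int} (hd : pvDirOK d) {i : Nat} (hi : i < n) :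
    ((PySem.List.pyRange 0 (n : Int) 1).foldl (fun t j =>
        let yx := dir_index_helper d (↑i) j
        if pvGet2 m yx.1 yx.2 ≠ 0 then t ++ [pvGet2 m yx.1 yx.2] else t) [])
      = (pvLineAt m d n i).filter (fun v => decide (v ≠ 0)) := by
  rw [pv_foldl_pyRange]
  have hn : ((n : Int) - 0).toNat = n := by omega
  rw [hn]
  have hb : (fun (t : List Int) (k : Nat) =>
        (fun j : Int =>
          let yx := dir_index_helper d (↑i) j
          if pvGet2 m yx.1 yx.2 ≠ 0 then t ++ [pvGet2 m yx.1 yx.2] else t) (0 + (k : Int)))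
      = (fun (t : List Int) (k : Nat) =>
          if (fun k : Nat => decide (pvGet2 m (dir_index_helper d ↑i ↑k).1
                (dir_index_helper d ↑i ↑k).2 ≠ 0)) k = true
          then t ++ [(fun k : Nat => pvGet2 m (dir_index_helper d ↑i ↑k).1
                (dir_index_helper d ↑i ↑k).2) k] else t) := by
    funext t k
    simp [zero_add]
  rw [hb, PySem.List.foldl_append_if, List.nil_append]
  simp only [pvLineAt]
  rw [List.filter_map]
  have hfil : (List.range n).filter (fun k : Nat =>
        decide (pvGet2 m (dir_index_helper d ↑i ↑k).1 (dir_index_helper d ↑i ↑k).2 ≠ 0))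
      = (List.range n).filter ((fun v : Int => decide (v ≠ 0)) ∘
          (fun j : Nat => pvNg m (pvCoord d n i j))) := by
    apply List.filter_congr
    intro j hj
    simp only [Function.comp]
    rw [pv_get2_coord hm hd hi (List.mem_range.mp hj)]
  rw [hfil]
  apply List.map_congr_left
  intro j hj
  exact pv_get2_coord hm hd hi (List.mem_range.mp (List.mem_of_mem_filter hj))

lemma pv_compact_length (n : Nat) (line : List Int) (h : line.length = n) :
    (pvCompact n line).length = n := by
  have := List.length_filter_le (fun v => decide (v ≠ 0)) line
  simp only [pvCompact, List.length_append, List.length_replicate]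
  omega

lemma pv_compact_full (n : Nat) (line : List Int) (h : line.length = n)
    (hk : (line.filter (fun v => decide (v ≠ 0))).length = n) : pvCompact n line = line := by
  have hfe : line.filter (fun v => decide (v ≠ 0)) = line := by
    rw [List.filter_eq_self]
    exact (List.length_filter_eq_length_iff ..).mp (by omega)
  simp only [pvCompact]
  rw [hfe, h]
  simp

lemma pv_compact_eq_iff (n : Nat) (line : List Int) (h : line.length = n) :
    (pvCompact n line = line)
      ↔ ∀ j, j < (line.filter (fun v => decide (v ≠ 0))).length →
          line.getD j 0 = (line.filter (fun v => decide (v ≠ 0))).getD j 0 := by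
  simp only [pvCompact]
  generalize htemp : line.filter (fun v => decide (v ≠ 0)) = temp
  have hk : temp.length ≤ n := by
    rw [← htemp, ← h]
    exact List.length_filter_le _ _
  constructor
  · intro heq j hj
    have hgj := congrArg (fun l => l[j]?) heq
    simp only at hgj
    rw [List.getElem?_append_left (by omega)] at hgj
    rw [List.getD_eq_getElem?_getD, List.getD_eq_getElem?_getD, ← hgj]
  · intro hall
    have htake : line.take temp.length = temp := by
      apply List.ext_getElem
      · rw [List.length_take]; omega
      · intro j hj1 hj2
        rw [List.getElem_take]
        have h3 := hall j (by omega)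
        rw [List.getD_eq_getElem _ _ (by omega), List.getD_eq_getElem _ _ (by omega)] at h3
        exact h3
    have hfl : temp = (line.take temp.length).filter (fun v => decide (v ≠ 0))
        ++ (line.drop temp.length).filter (fun v => decide (v ≠ 0)) := by
      rw [← List.filter_append, List.take_append_drop, htemp]
    have hfiltake : (line.take temp.length).filter (fun v => decide (v ≠ 0)) = temp := by
      rw [htake, List.filter_eq_self]
      intro a ha
      rw [← htemp] at ha
      exact (List.mem_filter.mp ha).2
    rw [hfiltake] at hfl
    have hdropnil : (line.drop temp.length).filter (fun v => decide (v ≠ 0)) = [] := by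
      have hlen := congrArg List.length hfl
      simp only [List.length_append] at hlen
      exact List.length_eq_zero_iff.mp (by omega)
    have hdrop : line.drop temp.length = List.replicate (n - temp.length) 0 := by
      rw [List.eq_replicate_iff]
      refine ⟨by rw [List.length_drop]; omega, ?_⟩
      intro b hb
      have := List.filter_eq_nil_iff.mp hdropnil b hb
      simp only [decide_eq_true_eq] at this
      by_contra hb0
      exact this hb0
    rw [← hdrop]
    conv_rhs => rw [← List.take_append_drop temp.length line]
    rw [htake]

lemma pv_compact_ne_iff (n : Nat) (line : List Int) (h : line.length = n) :
    (pvCompact n line ≠ line)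
      ↔ ∃ j, j < (line.filter (fun v => decide (v ≠ 0))).length
          ∧ line.getD j 0 ≠ (line.filter (fun v => decide (v ≠ 0))).getD j 0 := by
  rw [Ne, pv_compact_eq_iff n line h]
  push Not
  rfl

lemma pv_fold1 {n : Nat} {d : Int} (hd : pvDirOK d) {i : Nat} (hi : i < n)
    (temp : List Int) (m : List (List Int)) (ch : Bool) (hm : pvSquare m n) :
    ∀ t, t ≤ n →
    (pvSquare ((List.range t).foldl (fun st' (k : Nat) =>
        if pvGet2 st'.1 (dir_index_helper d ↑i ↑k).1 (dir_index_helper d ↑i ↑k).2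
            ≠ PySem.List.pyGetD temp ↑k 0 then
          (pvSet2 st'.1 (dir_index_helper d ↑i ↑k).1 (dir_index_helper d ↑i ↑k).2
            (PySem.List.pyGetD temp ↑k 0), true)
        else st') (m, ch)).1 n) ∧
    (∀ i' j', i' < n → j' < n → (i' ≠ i ∨ t ≤ j') →
      pvNg ((List.range t).foldl (fun st' (k : Nat) =>
        if pvGet2 st'.1 (dir_index_helper d ↑i ↑k).1 (dir_index_helper d ↑i ↑k).2
            ≠ PySem.List.pyGetD temp ↑k 0 then
          (pvSet2 st'.1 (dir_index_helper d ↑i ↑k).1 (dir_index_helper d ↑i ↑k).2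
            (PySem.List.pyGetD temp ↑k 0), true)
        else st') (m, ch)).1 (pvCoord d n i' j') = pvNg m (pvCoord d n i' j')) ∧
    (∀ j', j' < t →
      pvNg ((List.range t).foldl (fun st' (k : Nat) =>
        if pvGet2 st'.1 (dir_index_helper d ↑i ↑k).1 (dir_index_helper d ↑i ↑k).2
            ≠ PySem.List.pyGetD temp ↑k 0 then
          (pvSet2 st'.1 (dir_index_helper d ↑i ↑k).1 (dir_index_helper d ↑i ↑k).2
            (PySem.List.pyGetD temp ↑k 0), true)
        else st') (m, ch)).1 (pvCoord d n i j') = temp.getD j' 0) ∧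
    (((List.range t).foldl (fun st' (k : Nat) =>
        if pvGet2 st'.1 (dir_index_helper d ↑i ↑k).1 (dir_index_helper d ↑i ↑k).2
            ≠ PySem.List.pyGetD temp ↑k 0 then
          (pvSet2 st'.1 (dir_index_helper d ↑i ↑k).1 (dir_index_helper d ↑i ↑k).2
            (PySem.List.pyGetD temp ↑k 0), true)
        else st') (m, ch)).2
      = (ch || decide (∃ j', j' < t ∧ pvNg m (pvCoord d n i j') ≠ temp.getD j' 0))) := by
  intro t
  induction t with
  | zero =>
    intro _
    refine ⟨hm, fun i' j' _ _ _ => rfl, fun j' hj' => absurd hj' (by omega), by simp⟩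
  | succ t ih =>
    intro ht
    obtain ⟨ihsq, ihC2, ihC3, ihC4⟩ := ih (by omega)
    rw [List.range_succ, List.foldl_append, List.foldl_cons, List.foldl_nil]
    have ht' : t < n := by omega
    have hr1 : pvGet2 ((List.range t).foldl _ (m, ch)).1 (dir_index_helper d ↑i ↑t).1
        (dir_index_helper d ↑i ↑t).2 = pvNg ((List.range t).foldl _ (m, ch)).1
          (pvCoord d n i t) := pv_get2_coord ihsq hd hi ht'
    have hr2 : pvNg ((List.range t).foldl _ (m, ch)).1 (pvCoord d n i t)
        = pvNg m (pvCoord d n i t) := ihC2 i t hi ht' (Or.inr le_rfl)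
    rw [PySem.List.pyGetD_natCast temp t 0, hr1, hr2]
    by_cases hC : pvNg m (pvCoord d n i t) ≠ temp.getD t 0
    · rw [if_pos hC]
      have hs : pvSet2 ((List.range t).foldl _ (m, ch)).1 (dir_index_helper d ↑i ↑t).1
          (dir_index_helper d ↑i ↑t).2 (temp.getD t 0)
          = pvNs ((List.range t).foldl _ (m, ch)).1 (pvCoord d n i t) (temp.getD t 0) :=
        pv_set2_coord ihsq hd hi ht' _
      rw [hs]
      have hcl := pv_coord_lt hd hi ht'
      refine ⟨pv_square_ns ihsq hcl.1 _, ?_, ?_, ?_⟩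
      · intro i' j' hi' hj' hcond
        rw [pv_ng_ns ihsq hcl.1 hcl.2]
        rw [if_neg (pv_coord_inj hd hi' hj' hi ht' (by omega))]
        exact ihC2 i' j' hi' hj' (by omega)
      · intro j' hj'
        rw [pv_ng_ns ihsq hcl.1 hcl.2]
        by_cases hjt : j' = t
        · subst hjt
          rw [if_pos rfl]
        · rw [if_neg (pv_coord_inj hd hi (by omega) hi ht' (by omega))]
          exact ihC3 j' (by omega)
      · have hex : ∃ j', j' < t + 1 ∧ pvNg m (pvCoord d n i j') ≠ temp.getD j' 0 :=
          ⟨t, by omega, hC⟩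
        rw [decide_eq_true hex, Bool.or_true]
    · rw [if_neg hC]
      push Not at hC
      refine ⟨ihsq, ?_, ?_, ?_⟩
      · intro i' j' hi' hj' hcond
        exact ihC2 i' j' hi' hj' (by omega)
      · intro j' hj'
        by_cases hjt : j' = t
        · subst hjt
          rw [hr2]
          exact hC
        · exact ihC3 j' (by omega)
      · rw [ihC4]
        congr 1
        apply decide_eq_decide.mpr
        constructor
        · rintro ⟨j', h1, h2⟩
          exact ⟨j', by omega, h2⟩
        · rintro ⟨j', h1, h2⟩
          refine ⟨j', ?_, h2⟩
          rcases Nat.lt_succ_iff_lt_or_eq.mp h1 with h | h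
          · exact h
          · subst h
            exact absurd hC h2

lemma pv_fold2 {n : Nat} {d : Int} (hd : pvDirOK d) {i : Nat} (hi : i < n) (k0 : Nat) :
    ∀ t, k0 + t ≤ n → ∀ m : List (List Int), pvSquare m n →
    (pvSquare ((List.range t).foldl (fun m' (s : Nat) =>
        pvSet2 m' (dir_index_helper d ↑i ↑(k0 + s)).1 (dir_index_helper d ↑i ↑(k0 + s)).2 0)
        m) n) ∧
    (∀ i' j', i' < n → j' < n → (i' ≠ i ∨ j' < k0 ∨ k0 + t ≤ j') →
      pvNg ((List.range t).foldl (fun m' (s : Nat) =>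
        pvSet2 m' (dir_index_helper d ↑i ↑(k0 + s)).1 (dir_index_helper d ↑i ↑(k0 + s)).2 0)
        m) (pvCoord d n i' j') = pvNg m (pvCoord d n i' j')) ∧
    (∀ j', k0 ≤ j' → j' < k0 + t →
      pvNg ((List.range t).foldl (fun m' (s : Nat) =>
        pvSet2 m' (dir_index_helper d ↑i ↑(k0 + s)).1 (dir_index_helper d ↑i ↑(k0 + s)).2 0)
        m) (pvCoord d n i j') = 0) := by
  intro t
  induction t with
  | zero =>
    intro _ m hm
    exact ⟨hm, fun i' j' _ _ _ => rfl, fun j' h1 h2 => absurd h2 (by omega)⟩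
  | succ t ih =>
    intro ht m hm
    obtain ⟨ihsq, ihC2, ihC3⟩ := ih (by omega) m hm
    rw [List.range_succ, List.foldl_append, List.foldl_cons, List.foldl_nil]
    have ht' : k0 + t < n := by omega
    have hs : pvSet2 ((List.range t).foldl _ m) (dir_index_helper d ↑i ↑(k0 + t)).1
        (dir_index_helper d ↑i ↑(k0 + t)).2 0
        = pvNs ((List.range t).foldl _ m) (pvCoord d n i (k0 + t)) 0 :=
      pv_set2_coord ihsq hd hi ht' 0
    rw [hs]
    have hcl := pv_coord_lt hd hi ht'
    refine ⟨pv_square_ns ihsq hcl.1 _, ?_, ?_⟩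
    · intro i' j' hi' hj' hcond
      rw [pv_ng_ns ihsq hcl.1 hcl.2]
      rw [if_neg (pv_coord_inj hd hi' hj' hi ht' (by omega))]
      exact ihC2 i' j' hi' hj' (by omega)
    · intro j' h1 h2
      rw [pv_ng_ns ihsq hcl.1 hcl.2]
      by_cases hjt : j' = k0 + t
      · subst hjt
        rw [if_pos rfl]
      · rw [if_neg (pv_coord_inj hd hi (by omega) hi ht' (by omega))]
        exact ihC3 j' h1 (by omega)

def pvBody1 (d : Int) (i : Nat) (temp : List Int) (st' : List (List Int) × Bool) (k : Nat) :
    List (List Int) × Bool :=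
  if pvGet2 st'.1 (dir_index_helper d ↑i ↑k).1 (dir_index_helper d ↑i ↑k).2
      ≠ PySem.List.pyGetD temp ↑k 0 then
    (pvSet2 st'.1 (dir_index_helper d ↑i ↑k).1 (dir_index_helper d ↑i ↑k).2
      (PySem.List.pyGetD temp ↑k 0), true)
  else st'

def pvBody2 (d : Int) (i k0 : Nat) (m' : List (List Int)) (s : Nat) : List (List Int) :=
  pvSet2 m' (dir_index_helper d ↑i ↑(k0 + s)).1 (dir_index_helper d ↑i ↑(k0 + s)).2 0

lemma pv_fold1' {n : Nat} {d : Int} (hd : pvDirOK d) {i : Nat} (hi : i < n)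
    (temp : List Int) (m : List (List Int)) (ch : Bool) (hm : pvSquare m n)
    (t : Nat) (ht : t ≤ n) :
    (pvSquare ((List.range t).foldl (pvBody1 d i temp) (m, ch)).1 n) ∧
    (∀ i' j', i' < n → j' < n → (i' ≠ i ∨ t ≤ j') →
      pvNg ((List.range t).foldl (pvBody1 d i temp) (m, ch)).1 (pvCoord d n i' j')
        = pvNg m (pvCoord d n i' j')) ∧
    (∀ j', j' < t →
      pvNg ((List.range t).foldl (pvBody1 d i temp) (m, ch)).1 (pvCoord d n i j')
        = temp.getD j' 0) ∧
    (((List.range t).foldl (pvBody1 d i temp) (m, ch)).2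
      = (ch || decide (∃ j', j' < t ∧ pvNg m (pvCoord d n i j') ≠ temp.getD j' 0))) :=
  pv_fold1 hd hi temp m ch hm t ht

lemma pv_fold2' {n : Nat} {d : Int} (hd : pvDirOK d) {i : Nat} (hi : i < n) (k0 : Nat)
    (t : Nat) (ht : k0 + t ≤ n) (m : List (List Int)) (hm : pvSquare m n) :
    (pvSquare ((List.range t).foldl (pvBody2 d i k0) m) n) ∧
    (∀ i' j', i' < n → j' < n → (i' ≠ i ∨ j' < k0 ∨ k0 + t ≤ j') →
      pvNg ((List.range t).foldl (pvBody2 d i k0) m) (pvCoord d n i' j')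
        = pvNg m (pvCoord d n i' j')) ∧
    (∀ j', k0 ≤ j' → j' < k0 + t →
      pvNg ((List.range t).foldl (pvBody2 d i k0) m) (pvCoord d n i j') = 0) :=
  pv_fold2 hd hi k0 t ht m hm

lemma pv_stepA_spec {n : Nat} {d : Int} (hd : pvDirOK d) {i : Nat} (hi : i < n)
    (m : List (List Int)) (ch : Bool) (hm : pvSquare m n) :
    pvSquare (pvStepA n d (m, ch) ↑i).1 n ∧
    (∀ i', i' < n → i' ≠ i →
      pvLineAt (pvStepA n d (m, ch) ↑i).1 d n i' = pvLineAt m d n i') ∧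
    (pvLineAt (pvStepA n d (m, ch) ↑i).1 d n i = pvCompact n (pvLineAt m d n i)) ∧
    ((pvStepA n d (m, ch) ↑i).2
      = (ch || decide (pvCompact n (pvLineAt m d n i) ≠ pvLineAt m d n i))) := by
  have hlen : (pvLineAt m d n i).length = n := pv_lineAt_length m d n i
  have hk : ((pvLineAt m d n i).filter (fun v => decide (v ≠ 0))).length ≤ n := by
    have := List.length_filter_le (fun v : Int => decide (v ≠ 0)) (pvLineAt m d n i)
    omega
  simp only [pvStepA]
  rw [pv_temp_eq hm hd hi]
  generalize hT : (pvLineAt m d n i).filter (fun v => decide (v ≠ 0)) = temp at hk ⊢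
  by_cases hkn : temp.length = n
  · rw [if_pos hkn]
    have hcf : pvCompact n (pvLineAt m d n i) = pvLineAt m d n i :=
      pv_compact_full n _ hlen (by rw [hT]; exact hkn)
    refine ⟨hm, fun i' _ _ => rfl, by rw [hcf], ?_⟩
    rw [hcf]
    simp
  · rw [if_neg hkn]
    rw [pv_foldl_pyRange, pv_foldl_pyRange]
    have h1 : ((temp.length : Int) - 0).toNat = temp.length := by omega
    have h2 : ((n : Int) - (temp.length : Int)).toNat = n - temp.length := by omega
    rw [h1, h2]
    have hb1 : (fun (s : List (List Int) × Bool) (k : Nat) =>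
          (fun j : Int =>
            let yx := dir_index_helper d (↑i) j
            if pvGet2 s.1 yx.1 yx.2 ≠ PySem.List.pyGetD temp j 0 then
              (pvSet2 s.1 yx.1 yx.2 (PySem.List.pyGetD temp j 0), true)
            else s) (0 + (k : Int)))
        = pvBody1 d i temp := by
      funext s k
      simp only [pvBody1, zero_add]
    have hb2 : (fun (s : List (List Int)) (k : Nat) =>
          (fun j : Int =>
            let yx := dir_index_helper d (↑i) j
            pvSet2 s yx.1 yx.2 0) ((temp.length : Int) + (k : Int)))
        = pvBody2 d i temp.length := by
      funext s k
      simp only [pvBody2, Nat.cast_add]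
    rw [hb1, hb2]
    obtain ⟨sq1, C12, C13, C14⟩ := pv_fold1' hd hi temp m ch hm temp.length (by omega)
    obtain ⟨sq2, C22, C23⟩ := pv_fold2' hd hi temp.length (n - temp.length) (by omega)
      ((List.range temp.length).foldl (pvBody1 d i temp) (m, ch)).1 sq1
    refine ⟨sq2, ?_, ?_, ?_⟩
    · intro i' hi' hne
      simp only [pvLineAt]
      apply List.map_congr_left
      intro j hj
      have hjn := List.mem_range.mp hj
      rw [C22 i' j hi' hjn (Or.inl hne), C12 i' j hi' hjn (Or.inl hne)]
    · apply List.ext_getElem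
      · rw [pv_lineAt_length, pv_compact_length n _ hlen]
      · intro j hj1 hj2
        have hjn : j < n := by rw [pv_lineAt_length] at hj1; exact hj1
        have hL : ∀ (mm : List (List Int)) (hh : j < (pvLineAt mm d n i).length),
            (pvLineAt mm d n i)[j]'hh = pvNg mm (pvCoord d n i j) := by
          intro mm hh
          simp [pvLineAt]
        rw [hL]
        simp only [pvCompact]
        simp only [hT]
        by_cases hjk : j < temp.length
        · rw [C22 i j hi hjn (Or.inr (Or.inl hjk)), C13 j hjk]
          rw [List.getElem_append_left hjk]
          exact List.getD_eq_getElem temp 0 hjk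
        · rw [C23 j (by omega) (by omega)]
          rw [List.getElem_append_right (by omega)]
          rw [List.getElem_replicate]
    · rw [C14]
      congr 1
      apply decide_eq_decide.mpr
      rw [pv_compact_ne_iff n _ hlen, hT]
      apply exists_congr
      intro j
      apply and_congr_right
      intro hj
      rw [pv_lineAt_getD m d (show j < n by omega)]


lemma pv_foldA {d : Int} (hd : pvDirOK d) {n : Nat} (matrix : List (List Int))
    (hm : pvSquare matrix n) :
    ∀ t, t ≤ n →
    (pvSquare ((List.range t).foldl (fun st (k : Nat) => pvStepA n d st ↑k) (matrix, false)).1 n) ∧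
    (∀ i', t ≤ i' → i' < n →
      pvLineAt ((List.range t).foldl (fun st (k : Nat) => pvStepA n d st ↑k) (matrix, false)).1 d n i'
        = pvLineAt matrix d n i') ∧
    (((List.range t).foldl (fun st (k : Nat) => pvStepA n d st ↑k) (matrix, false)).2
      = (List.range t).any (fun i' =>
          decide (pvCompact n (pvLineAt matrix d n i') ≠ pvLineAt matrix d n i'))) := by
  intro t
  induction t with
  | zero =>
    intro _
    exact ⟨hm, fun i' _ _ => rfl, by simp⟩
  | succ t ih =>
    intro ht
    obtain ⟨ihsq, ihL, ihF⟩ := ih (by omega)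
    rw [List.range_succ, List.foldl_append, List.foldl_cons, List.foldl_nil]
    generalize hF : (List.range t).foldl (fun st (k : Nat) => pvStepA n d st ↑k)
      (matrix, false) = F at ihsq ihL ihF ⊢
    obtain ⟨Fm, Fc⟩ := F
    obtain ⟨ssq, sL, sLi, sF⟩ := pv_stepA_spec hd (show t < n by omega) Fm Fc ihsq
    refine ⟨ssq, ?_, ?_⟩
    · intro i' h1 h2
      rw [sL i' h2 (by omega)]
      exact ihL i' (by omega) h2
    · rw [sF, ihL t (by omega) (by omega)]
      have ihF' : Fc = (List.range t).any (fun i' =>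
          decide (pvCompact n (pvLineAt matrix d n i') ≠ pvLineAt matrix d n i')) := ihF
      rw [ihF']
      simp [List.any_append]

lemma pv_lines_eq {matrix : List (List Int)} {n : Nat} (hm : pvSquare matrix n)
    {d : Int} (hd : pvDirOK d) :
    pvLines matrix d = (List.range n).map (fun i => pvLineAt matrix d n i) := by
  obtain ⟨hlen, hsq⟩ := hm
  have hng : ∀ (r c : Nat) (hr : r < n),
      pvNg matrix (r, c) = (matrix[r]'(by omega)).getD c 0 := by
    intro r c hr
    simp only [pvNg]
    rw [List.getD_eq_getElem matrix [] (by omega)]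
  have hrowlen : ∀ (r : Nat) (hr : r < matrix.length), (matrix[r]'hr).length = n :=
    fun r hr => hsq _ (List.getElem_mem hr)
  rcases hd with h | h | h | h <;> subst h
  · -- dir = 0 : columns
    simp only [pvLines]
    norm_num
    rw [hlen]
    apply List.map_congr_left
    intro i hi
    have hin := List.mem_range.mp hi
    apply List.ext_getElem
    · simp [pv_lineAt_length, hlen]
    · intro j hj1 hj2
      have hjn : j < n := by simp [hlen] at hj1; omega
      rw [List.getElem_map]
      have hR : (pvLineAt matrix 0 n i)[j]'hj2 = pvNg matrix (pvCoord 0 n i j) := by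
        simp [pvLineAt]
      rw [hR, show pvCoord 0 n i j = (j, i) from by norm_num [pvCoord], hng j i hjn]
      rw [List.getD_eq_getElem?_getD]
  · -- dir = 1 : reversed rows
    simp only [pvLines]
    norm_num
    apply List.ext_getElem
    · simp [hlen]
    · intro r hr1 hr2
      have hrn : r < n := by simp [hlen] at hr1; omega
      rw [List.getElem_map, List.getElem_map, List.getElem_range]
      apply List.ext_getElem
      · simp [pv_lineAt_length, hrowlen]
      · intro j hj1 hj2
        have hjn : j < n := by
          rw [List.length_reverse, hrowlen] at hj1
          exact hj1
        rw [List.getElem_reverse]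
        have hR : (pvLineAt matrix 1 n r)[j]'hj2 = pvNg matrix (pvCoord 1 n r j) := by
          simp [pvLineAt]
        rw [hR, show pvCoord 1 n r j = (r, n - 1 - j) from by norm_num [pvCoord],
          hng r (n - 1 - j) hrn]
        rw [List.getD_eq_getElem _ _ (by rw [hrowlen]; omega)]
        congr 1
        rw [hrowlen]
  · -- dir = 2 : reversed columns
    simp only [pvLines]
    norm_num
    rw [hlen]
    apply List.map_congr_left
    intro i hi
    have hin := List.mem_range.mp hi
    apply List.ext_getElem
    · simp [pv_lineAt_length, hlen]
    · intro j hj1 hj2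
      have hjn : j < n := by simp [hlen] at hj1; omega
      rw [List.getElem_reverse, List.getElem_map]
      simp only [List.length_map, hlen]
      have hR : (pvLineAt matrix 2 n i)[j]'hj2 = pvNg matrix (pvCoord 2 n i j) := by
        simp [pvLineAt]
      rw [hR, show pvCoord 2 n i j = (n - 1 - j, i) from by norm_num [pvCoord],
        hng (n - 1 - j) i (by omega)]
      rw [List.getD_eq_getElem?_getD]
  · -- dir = 3 : rows
    simp only [pvLines]
    norm_num
    apply List.ext_getElem
    · simp [hlen]
    · intro r hr1 hr2
      have hrn : r < n := by omega
      rw [List.getElem_map, List.getElem_range]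
      apply List.ext_getElem
      · simp [pv_lineAt_length, hrowlen]
      · intro j hj1 hj2
        have hjn : j < n := by rw [hrowlen] at hj1; exact hj1
        have hR : (pvLineAt matrix 3 n r)[j]'hj2 = pvNg matrix (pvCoord 3 n r j) := by
          simp [pvLineAt]
        rw [hR, show pvCoord 3 n r j = (r, j) from by norm_num [pvCoord], hng r j hrn]
        rw [List.getD_eq_getElem _ _ (by rw [hrowlen]; omega)]

-- ===== VERDICT (by name: the statement is the Claim_ definition above) =====
theorem align_matrix_spec : Claim_equal_align_matrix := by
  intro matrix dir hdom hpre
  obtain ⟨hsq, hd⟩ := hpre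
  unfold Spec_align_matrix
  have hmlen : pvSquare matrix matrix.length := ⟨rfl, hsq⟩
  simp only [align_matrix]
  rw [pv_foldl_pyRange]
  have h1 : ((matrix.length : Int) - 0).toNat = matrix.length := by omega
  rw [h1]
  have hb : (fun (s : List (List Int) × Bool) (k : Nat) =>
        pvStepA matrix.length dir s (0 + (k : Int)))
      = (fun (st : List (List Int) × Bool) (k : Nat) => pvStepA matrix.length dir st ↑k) := by
    funext s k
    rw [zero_add]
  rw [hb]
  obtain ⟨-, -, hflag⟩ := pv_foldA hd matrix hmlen matrix.length le_rfl
  rw [hflag]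
  simp only [align_matrix_alt]
  rw [pv_lines_eq hmlen hd]
  rw [← pv_any_map_ne, List.any_map]
  rfl
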